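-- pv_equiv track=rewrite | github.com/Commit-ted/DI-Bootcamp | Week1_Python/D5/Lessons/matrix_refactured.py | creating_matrix
-- ===== SOURCE A (Python) =====
-- def creating_matrix(matrix_str):
--     rows = matrix_str.split('\n')
--     matrix = [list(row) for row in rows]
--
--     columns = []
--     for i in range(len(matrix[0])):
--         column = [row[i] for row in matrix]
--         columns.append(column)
--
--     return columns
-- ===== SOURCE B (Python) =====
-- def creating_matrix(matrix_str):
--     matrix = [list(row) for row in matrix_str.split('\n')]
--     columns = [[] for _ in matrix[0]]
--     for row in matrix:
--         columns = [col + [row[i]] for i, col in enumerate(columns)]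
--     return columns
-- ===== Notes on version B (the rewrite author's own statement) =====
-- stated objective: alternative
-- what changed: B makes a single pass over the rows, extending all pre-allocated columns simultaneously, instead of A's per-column rescan of every row.
import Mathlib
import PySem

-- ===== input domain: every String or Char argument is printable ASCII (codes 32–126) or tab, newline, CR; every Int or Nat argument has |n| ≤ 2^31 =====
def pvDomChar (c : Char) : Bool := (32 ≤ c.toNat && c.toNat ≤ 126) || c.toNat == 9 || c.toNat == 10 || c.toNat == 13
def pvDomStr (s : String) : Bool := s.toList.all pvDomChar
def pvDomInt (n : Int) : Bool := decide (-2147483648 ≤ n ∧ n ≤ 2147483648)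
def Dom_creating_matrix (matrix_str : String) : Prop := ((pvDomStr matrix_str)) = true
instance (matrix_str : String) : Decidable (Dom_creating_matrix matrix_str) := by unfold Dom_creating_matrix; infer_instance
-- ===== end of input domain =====

-- B transposes in a single pass over the rows, extending every column at once, instead of A's per-column rescan of all rows.

-- ===== PORT A =====
-- per-column outer loop: for i in range(len(matrix[0])): column = [row[i] for row in matrix]
def creating_matrix (matrix_str : String) : List (List String) :=
  let rows := PySem.Chars.splitOn matrix_str.toList ['\n']
  let matrix := rows.map (fun r => r.map (fun c => String.ofList [c]))
  (List.range matrix.headI.length).foldl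
    (fun columns (i : Nat) => columns ++ [matrix.map (fun row => PySem.List.pyGetD row (i : Int) "")])
    []

-- ===== PORT B =====
-- single pass over rows: columns = [col + [row[i]] for i, col in enumerate(columns)]
def creating_matrix_alt (matrix_str : String) : List (List String) :=
  let matrix := (PySem.Chars.splitOn matrix_str.toList ['\n']).map (fun r => r.map (fun c => String.ofList [c]))
  let init := matrix.headI.map (fun _ => ([] : List String))
  matrix.foldl
    (fun columns row =>
      (PySem.List.enumerate columns).map (fun p => p.2 ++ [PySem.List.pyGetD row p.1 ""]))
    init

-- ===== PRECONDITION & SPEC =====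
-- Pre_ excludes ragged inputs where some row is shorter than the first row: there Python A
-- (and B alike) raises IndexError on row[i].
def Pre_creating_matrix (matrix_str : String) : Prop :=
  ∀ r ∈ PySem.Chars.splitOn matrix_str.toList ['\n'],
    (PySem.Chars.splitOn matrix_str.toList ['\n']).headI.length ≤ r.length
instance (matrix_str : String) : Decidable (Pre_creating_matrix matrix_str) := by unfold Pre_creating_matrix; infer_instance
def pvWitness_creating_matrix : String := "ab\ncd"

def Spec_creating_matrix (matrix_str : String) (out : List (List String)) : Prop := out = creating_matrix_alt matrix_str
instance (matrix_str : String) (out : List (List String)) : Decidable (Spec_creating_matrix matrix_str out) := by unfold Spec_creating_matrix; infer_instance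

-- ===== CLAIM (what is proved, stated in full; the proofs are below) =====
def Claim_equal_creating_matrix : Prop := ∀ (matrix_str : String), Dom_creating_matrix matrix_str → Pre_creating_matrix matrix_str → Spec_creating_matrix matrix_str (creating_matrix matrix_str)

-- ===== LEMMAS AND PROOFS =====

-- enumerate of a mapped range pairs each element with its own index
theorem pv_enum_range {α : Type} (g : Nat → α) (n : Nat) :
    PySem.List.enumerate ((List.range n).map g) 0
      = (List.range n).map (fun k : Nat => ((k : Int), g k)) := by
  induction n with
  | zero => simp [PySem.List.enumerate_nil]
  | succ n ih =>
      simp [List.range_succ, PySem.List.enumerate_append, ih, PySem.List.enumerate_cons,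
        PySem.List.enumerate_nil]

-- B's fold over the rows, started from columns of shape (range n).map g, appends each
-- row's i-th entry to column i.
theorem pv_bfold (m : List (List String)) (n : Nat) (g : Nat → List String) :
    m.foldl
      (fun columns row =>
        (PySem.List.enumerate columns).map (fun p => p.2 ++ [PySem.List.pyGetD row p.1 ""]))
      ((List.range n).map g)
    = (List.range n).map
        (fun i : Nat => g i ++ m.map (fun row => PySem.List.pyGetD row (i : Int) "")) := by
  induction m generalizing g with
  | nil => simp
  | cons row m ih =>
      simp only [List.foldl_cons, pv_enum_range, List.map_map, Function.comp_def]
      rw [ih]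
      simp [List.append_assoc]

-- A's append-loop over the column indices is a map over those indices.
theorem pv_afold (m : List (List String)) (n : Nat) :
    (List.range n).foldl
      (fun columns (i : Nat) =>
        columns ++ [m.map (fun row => PySem.List.pyGetD row (i : Int) "")]) []
    = (List.range n).map (fun i : Nat => m.map (fun row => PySem.List.pyGetD row (i : Int) "")) := by
  exact (PySem.List.foldl_append_singleton_eq_map
    (l := List.range n) (acc := [])
    (f := fun i : Nat => m.map (fun row => PySem.List.pyGetD row (i : Int) ""))).trans
    (List.nil_append _)

-- ===== VERDICT (by name: the statement is the Claim_ definition above) =====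
theorem creating_matrix_spec : Claim_equal_creating_matrix := by
  intro s _ _
  show creating_matrix s = creating_matrix_alt s
  simp only [creating_matrix, creating_matrix_alt]
  generalize (PySem.Chars.splitOn s.toList ['\n']).map
      (fun r => r.map (fun c => String.ofList [c])) = m
  rw [pv_afold,
    show m.headI.map (fun _ => ([] : List String))
        = (List.range m.headI.length).map (fun _ => ([] : List String)) by
      simp [List.map_const'],
    pv_bfold]
  simp
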